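-- pv_equiv track=rewrite | github.com/Nouman404/nouman404.github.io | _posts/CTFs/404CTF_2023/Programmation/desMots.py | trieRegle
-- ===== SOURCE A (Python) =====
-- def trieRegle(mot):
-- 	val = {}
-- 	for char in mot:
-- 		if char in val.keys():
-- 			val[char] += 1
-- 		else:
-- 			val[char] = 1
-- 	sorted_dict = {k: v for k, v in sorted(val.items(), key=lambda item: (-item[1], item[0]))}
-- 	mot_final = ""
-- 	for key in sorted_dict.keys():
-- 		mot_final += key*sorted_dict[key]
-- 	return mot_final
-- ===== SOURCE B (Python) =====
-- def trieRegle(mot):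
-- 	count = {}
-- 	for c in mot:
-- 		count[c] = count.get(c, 0) + 1
-- 	return "".join(sorted(mot, key=lambda c: (-count[c], c)))
-- ===== Notes on version B (the rewrite author's own statement) =====
-- stated objective: idiomatic
-- what changed: Instead of sorting the distinct characters and rebuilding the string by repeating each one count times, B sorts the string's characters themselves with the key (-count, char), relying on sort stability to keep equal characters grouped.
import Mathlib
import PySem

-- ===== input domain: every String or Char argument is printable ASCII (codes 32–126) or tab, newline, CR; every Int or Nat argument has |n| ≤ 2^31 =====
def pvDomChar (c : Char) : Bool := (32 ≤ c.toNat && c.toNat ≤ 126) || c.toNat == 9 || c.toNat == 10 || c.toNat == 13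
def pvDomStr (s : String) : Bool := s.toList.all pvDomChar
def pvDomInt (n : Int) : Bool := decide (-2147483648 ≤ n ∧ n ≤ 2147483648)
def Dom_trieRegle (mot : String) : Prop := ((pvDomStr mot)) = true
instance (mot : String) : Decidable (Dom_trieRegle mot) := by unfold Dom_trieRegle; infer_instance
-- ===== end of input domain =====

-- B sorts the string's characters directly with key (-count, char) instead of sorting distinct
-- characters and rebuilding by repetition (objective: idiomatic; same return value).


-- ===== PORT A =====
-- frequency dict, sort the distinct (char, count) items by (-count, char), rebuild by repetition
def trieRegle (mot : String) : String :=
  let val := mot.toList.foldl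
    (fun d c => if d.contains c then d.insert c (d.getD c 0 + 1) else d.insert c 1)
    PySem.Dict.empty
  let sortedItems := PySem.List.sorted2 val.items (fun it => -it.2) (fun it => it.1) false
  let sd := sortedItems.foldl (fun d it => d.insert it.1 it.2) PySem.Dict.empty
  String.mk (sd.keys.foldl (fun acc k => acc ++ PySem.List.pyRepeat [k] (sd.getD k 0)) [])

-- ===== PORT B =====
-- count, then stable-sort the characters themselves by (-count, char)
def trieRegle_alt (mot : String) : String :=
  let count := mot.toList.foldl (fun d c => d.insert c (d.getD c 0 + 1)) PySem.Dict.empty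
  String.mk (PySem.List.sorted2 mot.toList (fun c => -(count.getD c 0)) (fun c => c) false)

-- ===== PRECONDITION & SPEC =====
def Spec_trieRegle (mot : String) (out : String) : Prop := out = trieRegle_alt mot
instance (mot : String) (out : String) : Decidable (Spec_trieRegle mot out) := by unfold Spec_trieRegle; infer_instance

-- ===== CLAIM (what is proved, stated in full; the proofs are below) =====
def Claim_equal_trieRegle : Prop := ∀ (mot : String), Dom_trieRegle mot → Spec_trieRegle mot (trieRegle mot)

-- ===== LEMMAS AND PROOFS =====

-- sorted with a two-component key is sorted with the lexicographic key
lemma sorted2_eq_sorted_lex {α κ₁ κ₂ : Type} [LinearOrder κ₁] [LinearOrder κ₂]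
    (xs : List α) (k1 : α → κ₁) (k2 : α → κ₂) :
    PySem.List.sorted2 xs k1 k2 false
      = PySem.List.sorted xs (fun x => toLex (k1 x, k2 x)) false := by
  have hbef : (fun a b => decide (k1 a < k1 b) || (!decide (k1 b < k1 a) && decide (k2 a < k2 b)))
      = (fun a b => decide ((toLex (k1 a, k2 a) : κ₁ ×ₗ κ₂) < toLex (k1 b, k2 b))) := by
    funext a b
    rw [Bool.eq_iff_iff]
    simp only [Prod.Lex.toLex_lt_toLex, Bool.or_eq_true, Bool.and_eq_true, Bool.not_eq_true',
      decide_eq_true_iff, decide_eq_false_iff_not]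
    rcases lt_trichotomy (k1 a) (k1 b) with h | h | h
    · simp [h]
    · simp [h]
    · simp [h, ne_of_gt h, (not_lt_of_gt h : ¬ k1 a < k1 b)]
  show List.foldl (fun acc x => PySem.List.insertBy _ x acc) [] xs
      = List.foldl (fun acc x => PySem.List.insertBy _ x acc) [] xs
  rw [hbef]

-- A's counting loop builds Counter(mot)
lemma fold_eq_counter (cs : List Char) :
    cs.foldl (fun d c => if d.contains c then d.insert c (d.getD c 0 + 1) else d.insert c 1)
      PySem.Dict.empty = PySem.Dict.counter cs := by
  rw [← PySem.Dict.foldl_insert_getD_add_one_eq_counter]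
  congr 1
  funext d c
  by_cases h : d.contains c = true
  · simp [h]
  · have h0 : d.getD c 0 = 0 :=
      PySem.Dict.getD_of_not_contains d 0 (by simpa using h)
    simp [h, h0]

-- replicating each distinct element count-many times is a permutation of the original list
lemma flatMap_replicate_perm {α : Type} [BEq α] [LawfulBEq α] :
    ∀ (ks : List α), ks.Nodup → ∀ (cs : List α), (∀ x ∈ cs, x ∈ ks) →
      (ks.flatMap (fun k => List.replicate (cs.count k) k)).Perm cs := by
  intro ks
  induction ks with
  | nil =>
    intro _ cs hmem
    cases cs with
    | nil => simp
    | cons c cs => exact absurd (hmem c (by simp)) (by simp)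
  | cons k ks ih =>
    intro hnd cs hmem
    have hknotin : k ∉ ks := (List.nodup_cons.mp hnd).1
    have hndk : ks.Nodup := (List.nodup_cons.mp hnd).2
    rw [List.flatMap_cons]
    have h1 : List.replicate (cs.count k) k = cs.filter (· == k) := (List.filter_beq k).symm
    have hcount : ks.flatMap (fun k' => List.replicate (cs.count k') k')
        = ks.flatMap (fun k' => List.replicate ((cs.filter (fun x => !(x == k))).count k') k') := by
      simp only [List.flatMap]
      refine congrArg List.flatten (List.map_congr_left ?_)
      intro k' hk'
      have hne : k' ≠ k := fun h => hknotin (h ▸ hk')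
      rw [List.count_filter (by simpa using hne)]
    have hperm2 : (ks.flatMap
        (fun k' => List.replicate ((cs.filter (fun x => !(x == k))).count k') k')).Perm
        (cs.filter (fun x => !(x == k))) := by
      refine ih hndk (cs.filter (fun x => !(x == k))) (fun x hx => by
        rw [List.mem_filter] at hx
        have hxne : x ≠ k := by simpa using hx.2
        have := hmem x hx.1
        simpa [hxne] using this)
    rw [h1, hcount]
    exact ((hperm2.append_left _).trans (List.filter_append_perm _ cs))

-- the heart of the equivalence, stated on the character list
lemma trieRegle_list_eq (cs : List Char) :
    (((PySem.List.sorted2 (PySem.Dict.counter cs).items (fun it => -it.2) (fun it => it.1)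
        false).foldl (fun d it => d.insert it.1 it.2) PySem.Dict.empty).keys.foldl
      (fun acc k => acc ++ PySem.List.pyRepeat [k]
        (((PySem.List.sorted2 (PySem.Dict.counter cs).items (fun it => -it.2) (fun it => it.1)
          false).foldl (fun d it => d.insert it.1 it.2) PySem.Dict.empty).getD k 0)) [])
    = PySem.List.sorted2 cs (fun c => -((PySem.Dict.counter cs).getD c 0)) (fun c => c) false := by
  simp only [PySem.Dict.getD_counter]
  rw [sorted2_eq_sorted_lex cs (fun c => -(cs.count c : Int)) (fun c => c)]
  set K : Char → Int ×ₗ Char := fun c => toLex (-(cs.count c : Int), c) with hK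
  set itemsL : List (Char × Int) :=
    (PySem.Set.ofList cs).map (fun k => (k, (cs.count k : Int))) with hitemsL
  have hsi : PySem.List.sorted2 (PySem.Dict.counter cs).items
      (fun it => -it.2) (fun it => it.1) false
      = PySem.List.sorted itemsL (fun it => toLex (-it.2, it.1)) false := by
    rw [PySem.Dict.items_counter, sorted2_eq_sorted_lex]
  set sortedItems := PySem.List.sorted2 (PySem.Dict.counter cs).items
      (fun it => -it.2) (fun it => it.1) false with hsid
  set sd := sortedItems.foldl (fun d it => d.insert it.1 it.2) PySem.Dict.empty with hsd
  have hsip : sortedItems.Perm itemsL := by rw [hsi]; exact PySem.List.sorted_perm _ _ _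
  have hmem2 : ∀ it ∈ sortedItems, it.2 = (cs.count it.1 : Int) := by
    intro it h
    have hit : it ∈ itemsL := hsip.mem_iff.mp h
    obtain ⟨k, _, rfl⟩ := List.mem_map.mp hit
    rfl
  have hfst : (sortedItems.map Prod.fst).Nodup := by
    rw [(hsip.map Prod.fst).nodup_iff]
    have : itemsL.map Prod.fst = PySem.Set.ofList cs := by
      simp [hitemsL, List.map_map]
      exact List.map_id _
    rw [this]
    exact PySem.Set.nodup_ofList cs
  have hitems : sd.items = sortedItems := by
    have h := PySem.Dict.items_foldl_insert_fresh sortedItems Prod.fst Prod.snd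
      PySem.Dict.empty (fun a _ => by simp [PySem.Dict.contains_empty]) hfst
    simpa using h
  have hkeys : sd.keys = sortedItems.map Prod.fst := by
    simp only [PySem.Dict.keys, hitems]
  have hnk : sd.keys.Nodup := by rw [hkeys]; exact hfst
  have hget : ∀ it ∈ sortedItems, sd.getD it.1 0 = it.2 := by
    intro it h
    exact PySem.Dict.getD_of_mem_items sd (by rw [hitems]; exact h) hnk 0
  rw [PySem.List.foldl_append_eq_flatMap, List.nil_append, hkeys, List.flatMap_map]
  have hA : sortedItems.flatMap (fun it => PySem.List.pyRepeat [it.1] (sd.getD it.1 0))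
      = sortedItems.flatMap (fun it => List.replicate (cs.count it.1) it.1) := by
    simp only [List.flatMap]
    refine congrArg List.flatten (List.map_congr_left ?_)
    intro it h
    rw [hget it h, PySem.List.pyRepeat_singleton, hmem2 it h, Int.toNat_natCast]
  rw [hA]
  refine PySem.List.eq_of_perm_of_pairwise_le_of_injective K
    (fun a b h => by simpa using congrArg (fun x => (ofLex x).2) h) ?_ ?_ ?_
  · -- permutation
    have p1 : (sortedItems.flatMap (fun it => List.replicate (cs.count it.1) it.1)).Perm
        (itemsL.flatMap (fun it => List.replicate (cs.count it.1) it.1)) :=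
      hsip.flatMap (fun a _ => List.Perm.refl _)
    have p2 : itemsL.flatMap (fun it => List.replicate (cs.count it.1) it.1)
        = (PySem.Set.ofList cs).flatMap (fun k => List.replicate (cs.count k) k) := by
      rw [hitemsL, List.flatMap_map]
    have p3 : ((PySem.Set.ofList cs).flatMap
        (fun k => List.replicate (cs.count k) k)).Perm cs :=
      flatMap_replicate_perm (PySem.Set.ofList cs) (PySem.Set.nodup_ofList cs) cs
        (fun x hx => (PySem.Set.mem_ofList cs x).mpr hx)
    exact (p1.trans (p2 ▸ p3)).trans (PySem.List.sorted_perm cs K false).symm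
  · -- A's list is pairwise sorted for K
    have hpw : List.Pairwise (fun a b : Char × Int =>
        (toLex (-a.2, a.1) : Int ×ₗ Char) ≤ toLex (-b.2, b.1)) sortedItems := by
      rw [hsi]
      exact PySem.List.sorted_pairwise itemsL _
    simp only [List.flatMap]
    rw [List.pairwise_flatten]
    constructor
    · intro l hl
      obtain ⟨it, _, rfl⟩ := List.mem_map.mp hl
      exact List.pairwise_replicate.mpr (Or.inr (le_refl _))
    · rw [List.pairwise_map]
      refine hpw.imp_of_mem ?_
      intro a b ha hb hle x hx y hy
      rw [List.eq_of_mem_replicate hx, List.eq_of_mem_replicate hy]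
      have hKa : K a.1 = toLex (-a.2, a.1) := by rw [hK]; simp [hmem2 a ha]
      have hKb : K b.1 = toLex (-b.2, b.1) := by rw [hK]; simp [hmem2 b hb]
      rw [hKa, hKb]; exact hle
  · exact PySem.List.sorted_pairwise cs K

theorem trieRegle_eq (mot : String) : trieRegle mot = trieRegle_alt mot := by
  unfold trieRegle trieRegle_alt
  rw [fold_eq_counter, PySem.Dict.foldl_insert_getD_add_one_eq_counter]
  exact congrArg String.mk (trieRegle_list_eq mot.toList)

-- ===== VERDICT (by name: the statement is the Claim_ definition above) =====
theorem trieRegle_spec : Claim_equal_trieRegle := by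
  intro mot _
  unfold Spec_trieRegle
  exact trieRegle_eq mot
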